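-- pv_equiv track=rewrite | github.com/lchristie/Sums-of-Roots-of-Unity | support.py | genf0s
-- ===== SOURCE A (Python) =====
-- import math
--
-- def isPrime(number):
--     if number > 1:
--         if number == 2:
--             return True
--         if number % 2 == 0:
--             return False
--         for current in range(3, int(math.sqrt(number) + 1), 2):
--             if number % current == 0:
--                 return False
--         return True
--     return False
--
-- def getPrimes(number):
--     while True:
--         if isPrime(number):
--             yield number
--         number += 1
--
-- def findNthPrime(n):
--     if n == 0:
--         return 1
--
--     primeGenerator = getPrimes(1)
--
--     for index in range(n - 1):
--         next(primeGenerator)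
--
--     return next(primeGenerator)
--
-- def prodPrevPrimes (aPrime):
--     index = 0
--     output = 1
--     while findNthPrime(index) < aPrime:
--         output *= findNthPrime(index)
--         index += 1
--     return output
--
-- def genf0s (aWeight, aTopPrime):
--     layerOutput = [[[1,0]]]
--     relOrder = prodPrevPrimes(aTopPrime)
--     for index in range(aWeight - 1):
--         nextLayerOutput = []
--         for item in layerOutput:
--             if index == 0:
--                 for i in range(1,relOrder // 2):
--                     nextLayerOutput.append(item + [[relOrder, i]])
--             else:
--                 for i in range(1, item[-1][-1]):
--                     nextLayerOutput.append(item + [[relOrder, i]])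
--         layerOutput = nextLayerOutput
--     return layerOutput
-- ===== SOURCE B (Python) =====
-- import math
--
-- def isPrime(number):
--     if number > 1:
--         if number == 2:
--             return True
--         if number % 2 == 0:
--             return False
--         for current in range(3, int(math.sqrt(number) + 1), 2):
--             if number % current == 0:
--                 return False
--         return True
--     return False
--
-- def getPrimes(number):
--     while True:
--         if isPrime(number):
--             yield number
--         number += 1
--
-- def findNthPrime(n):
--     if n == 0:
--         return 1
--
--     primeGenerator = getPrimes(1)
--
--     for index in range(n - 1):
--         next(primeGenerator)
--
--     return next(primeGenerator)
--
-- def prodPrevPrimes (aPrime):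
--     index = 0
--     output = 1
--     while findNthPrime(index) < aPrime:
--         output *= findNthPrime(index)
--         index += 1
--     return output
--
-- def genf0s(aWeight, aTopPrime):
--     # Directly enumerate the strictly-decreasing index tails in lexicographic
--     # order instead of growing layer lists breadth-first.
--     relOrder = prodPrevPrimes(aTopPrime)
--     k = aWeight - 1
--     if k <= 0:
--         return [[[1, 0]]]
--
--     def tails(length, bound):
--         if length == 0:
--             return [[]]
--         return [[[relOrder, top]] + rest
--                 for top in range(1, bound)
--                 for rest in tails(length - 1, top)]
--
--     return [[[1, 0]] + t for t in tails(k, relOrder // 2)]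
-- ===== Notes on version B (the rewrite author's own statement) =====
-- stated objective: simpler
-- what changed: B replaces A's breadth-first layer-by-layer expansion (rebuilding the whole list of partial combinations once per weight level) by a single recursive enumeration of the strictly-decreasing index tails in lexicographic order; relOrder is still computed by the module's prodPrevPrimes helper.
import Mathlib
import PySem

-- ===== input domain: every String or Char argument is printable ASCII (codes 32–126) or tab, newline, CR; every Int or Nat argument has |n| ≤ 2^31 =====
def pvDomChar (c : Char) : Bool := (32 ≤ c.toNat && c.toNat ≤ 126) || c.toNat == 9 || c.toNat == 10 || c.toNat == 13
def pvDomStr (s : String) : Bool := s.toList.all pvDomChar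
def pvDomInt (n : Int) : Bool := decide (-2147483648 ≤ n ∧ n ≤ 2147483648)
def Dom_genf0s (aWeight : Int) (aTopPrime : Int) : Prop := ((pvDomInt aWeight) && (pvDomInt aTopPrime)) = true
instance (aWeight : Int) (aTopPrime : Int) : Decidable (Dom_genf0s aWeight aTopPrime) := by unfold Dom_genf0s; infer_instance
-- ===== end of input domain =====

-- B replaces A's breadth-first layer-by-layer expansion by a direct recursive enumeration of the
-- strictly-decreasing index tails in lexicographic order (objective: simpler); relOrder is computed
-- by the module's existing prodPrevPrimes helper in both.

-- ===== PORT A =====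
-- Shared module helpers (isPrime / findNthPrime / prodPrevPrimes), used verbatim by both A and B.
-- isPrime: `range(3, int(math.sqrt(number) + 1), 2)`. For 1 < number ≤ 2^31 + 1 the double-precision
-- sqrt never rounds across an integer, so int(math.sqrt(number) + 1) = Nat.sqrt number.toNat + 1
-- exactly on the stated domain.
def isPrimeL (number : Int) : Bool :=
  if number > 1 then
    if number == 2 then true
    else if PySem.Int.mod number 2 == 0 then false
    else
      (PySem.List.pyRange 3 ((Nat.sqrt number.toNat : Int) + 1) 2).all
        (fun current => PySem.Int.mod number current != 0)
  else false

-- The getPrimes generator consumed n times: scan candidates upward counting primes.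
-- Fuel makes the scan total; fuel n^2 + 3 is never exhausted since the n-th prime is ≤ n^2 + 2.
def scanPrimesL : Nat → Int → Int → Int
  | 0, cand, _ => cand
  | fuel + 1, cand, k =>
    if isPrimeL cand then
      if k ≤ 1 then cand else scanPrimesL fuel (cand + 1) (k - 1)
    else scanPrimesL fuel (cand + 1) k

def findNthPrimeL (n : Int) : Int :=
  if n == 0 then 1
  else scanPrimesL (n.toNat * n.toNat + 3) 2 n

-- while findNthPrime(index) < aPrime: fuel aPrime + 1 suffices (findNthPrime index ≥ index).
def prodPrevPrimesLoop : Nat → Int → Int → Int → Int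
  | 0, _, output, _ => output
  | fuel + 1, index, output, aPrime =>
    if findNthPrimeL index < aPrime then
      prodPrevPrimesLoop fuel (index + 1) (output * findNthPrimeL index) aPrime
    else output

def prodPrevPrimesL (aPrime : Int) : Int :=
  prodPrevPrimesLoop (aPrime.toNat + 1) 0 1 aPrime

-- item[-1][-1]; the .getD defaults are unreachable (items always end in a two-element list).
def lastlastL (item : List (List Int)) : Int :=
  (PySem.List.pyGet? ((PySem.List.pyGet? item (-1)).getD []) (-1)).getD 0

def genf0s (aWeight : Int) (aTopPrime : Int) : List (List (List Int)) :=
  let relOrder := prodPrevPrimesL aTopPrime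
  (PySem.List.pyRange 0 (aWeight - 1) 1).foldl
    (fun layerOutput index =>
      layerOutput.foldl
        (fun nextLayerOutput item =>
          if index == 0 then
            (PySem.List.pyRange 1 (PySem.Int.floordiv relOrder 2) 1).foldl
              (fun acc i => acc ++ [item ++ [[relOrder, i]]]) nextLayerOutput
          else
            (PySem.List.pyRange 1 (lastlastL item) 1).foldl
              (fun acc i => acc ++ [item ++ [[relOrder, i]]]) nextLayerOutput)
        [])
    [[[1, 0]]]

-- ===== PORT B =====
-- tails(length, bound): all strictly-decreasing tails [[relOrder,top], …] with top < bound,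
-- in lexicographic order (the nested comprehension of Source B).
def tailsL (relOrder : Int) : Nat → Int → List (List (List Int))
  | 0, _ => [[]]
  | n + 1, bound =>
    (PySem.List.pyRange 1 bound 1).flatMap
      (fun top => (tailsL relOrder n top).map (fun rest => [relOrder, top] :: rest))

def genf0s_alt (aWeight : Int) (aTopPrime : Int) : List (List (List Int)) :=
  let relOrder := prodPrevPrimesL aTopPrime
  let k := aWeight - 1
  if k ≤ 0 then [[[1, 0]]]
  else (tailsL relOrder k.toNat (PySem.Int.floordiv relOrder 2)).map (fun t => [1, 0] :: t)

-- ===== PRECONDITION & SPEC =====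
def Spec_genf0s (aWeight : Int) (aTopPrime : Int) (out : List (List (List Int))) : Prop := out = genf0s_alt aWeight aTopPrime
instance (aWeight : Int) (aTopPrime : Int) (out : List (List (List Int))) : Decidable (Spec_genf0s aWeight aTopPrime out) := by unfold Spec_genf0s; infer_instance

-- ===== CLAIM (what is proved, stated in full; the proofs are below) =====
def Claim_equal_genf0s : Prop := ∀ (aWeight : Int) (aTopPrime : Int), Dom_genf0s aWeight aTopPrime → Spec_genf0s aWeight aTopPrime (genf0s aWeight aTopPrime)

-- ===== LEMMAS AND PROOFS =====

-- A's one-layer step (with relOrder abstracted), exactly the outer foldl body of genf0s.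
def stepA (relOrder : Int) (layerOutput : List (List (List Int))) (index : Int) : List (List (List Int)) :=
  layerOutput.foldl
    (fun nextLayerOutput item =>
      if index == 0 then
        (PySem.List.pyRange 1 (PySem.Int.floordiv relOrder 2) 1).foldl
          (fun acc i => acc ++ [item ++ [[relOrder, i]]]) nextLayerOutput
      else
        (PySem.List.pyRange 1 (lastlastL item) 1).foldl
          (fun acc i => acc ++ [item ++ [[relOrder, i]]]) nextLayerOutput)
    []

lemma tailsL_succ (r : Int) (n : Nat) (b : Int) :
    tailsL r (n + 1) b
      = (PySem.List.pyRange 1 b 1).flatMap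
          (fun top => (tailsL r n top).map (fun rest => [r, top] :: rest)) := rfl

lemma flatMap_singleton_map {α β : Type} (l : List α) (f : α → β) :
    l.flatMap (fun x => [f x]) = l.map f := by
  induction l with
  | nil => rfl
  | cons a l ih => simp [ih]

lemma tailsL_one (r : Int) (b : Int) :
    tailsL r (0 + 1) b = (PySem.List.pyRange 1 b 1).map (fun top => [[r, top]]) := by
  rw [tailsL_succ]
  exact flatMap_singleton_map (PySem.List.pyRange 1 b 1) (fun top => [[r, top]])

lemma tailsL_ne_nil (r : Int) (n : Nat) (b : Int) (t : List (List Int))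
    (ht : t ∈ tailsL r (n + 1) b) : t ≠ [] := by
  rw [tailsL_succ] at ht
  simp only [List.mem_flatMap, List.mem_map] at ht
  obtain ⟨top, -, rest, -, rfl⟩ := ht
  simp

lemma lastlastL_pair (r top : Int) : lastlastL [[r, top]] = top := by
  simp [lastlastL, PySem.List.pyGet?_neg_one]

lemma lastlastL_cons (x : List Int) (t : List (List Int)) (ht : t ≠ []) :
    lastlastL (x :: t) = lastlastL t := by
  cases t with
  | nil => exact absurd rfl ht
  | cons h ts => simp [lastlastL, PySem.List.pyGet?_neg_one]

lemma flatMap_congr_mem {α β : Type} (l : List α) (f g : α → List β)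
    (h : ∀ x ∈ l, f x = g x) : l.flatMap f = l.flatMap g := by
  induction l with
  | nil => rfl
  | cons a l ih =>
    simp only [List.flatMap_cons, h a (by simp), ih (fun x hx => h x (by simp [hx]))]

-- Core: extending every tail by all strictly smaller new last indices yields the tails
-- one longer, in the same order.
lemma extend_tails (r : Int) : ∀ (m : Nat) (b : Int),
    (tailsL r (m + 1) b).flatMap
      (fun t => (PySem.List.pyRange 1 (lastlastL t) 1).map (fun i => t ++ [[r, i]]))
    = tailsL r (m + 1 + 1) b := by
  intro m
  induction m with
  | zero =>
    intro b
    rw [tailsL_one, List.flatMap_map, tailsL_succ]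
    simp only [tailsL_one]
    refine flatMap_congr_mem _ _ _ (fun top _ => ?_)
    simp [lastlastL_pair]
  | succ m ih =>
    intro b
    rw [tailsL_succ r (m + 1) b, List.flatMap_assoc, tailsL_succ r (m + 1 + 1) b]
    refine flatMap_congr_mem _ _ _ (fun top _ => ?_)
    rw [List.flatMap_map]
    refine Eq.trans (flatMap_congr_mem (tailsL r (m + 1) top) _
      (fun t => ((PySem.List.pyRange 1 (lastlastL t) 1).map (fun i => t ++ [[r, i]])).map
        (fun u => [r, top] :: u)) (fun t ht => ?_)) ?_
    · rw [lastlastL_cons _ _ (tailsL_ne_nil r m top t ht)]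
      simp [List.map_map, Function.comp_def]
    · rw [← List.map_flatMap, ih top]

-- Folding A's step over any list of nonzero indices advances the tails length by the list length.
lemma stepA_fold (r : Int) (l : List Int) (hl : ∀ x ∈ l, x ≠ 0) :
    ∀ (j : Nat) (b : Int),
      l.foldl (stepA r) ((tailsL r (j + 1) b).map (fun t => [1, 0] :: t))
      = (tailsL r (j + 1 + l.length) b).map (fun t => [1, 0] :: t) := by
  induction l with
  | nil => intro j b; simp
  | cons x l ih =>
    intro j b
    have hx : (x == 0) = false := by simpa using hl x (by simp)
    have hstep : stepA r ((tailsL r (j + 1) b).map (fun t => [1, 0] :: t)) x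
        = (tailsL r (j + 1 + 1) b).map (fun t => [1, 0] :: t) := by
      unfold stepA
      simp only [hx, Bool.false_eq_true, if_false,
        PySem.List.foldl_append_singleton_eq_map, PySem.List.foldl_append_eq_flatMap,
        List.nil_append, List.flatMap_map]
      have hcongr : (tailsL r (j + 1) b).flatMap
          (fun t => (PySem.List.pyRange 1 (lastlastL ([1, 0] :: t)) 1).map
            (fun i => ([1, 0] :: t) ++ [[r, i]]))
        = (tailsL r (j + 1) b).flatMap
          (fun t => ((PySem.List.pyRange 1 (lastlastL t) 1).map
            (fun i => t ++ [[r, i]])).map (fun u => [1, 0] :: u)) := by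
        refine flatMap_congr_mem _ _ _ (fun t ht => ?_)
        rw [lastlastL_cons _ _ (tailsL_ne_nil r j b t ht)]
        simp [List.map_map, Function.comp]
      rw [hcongr, ← List.map_flatMap, extend_tails r j b]
    rw [List.foldl_cons, hstep]
    have hlen : j + 1 + (x :: l).length = j + 1 + 1 + l.length := by
      simp [List.length_cons]; omega
    rw [hlen]
    exact ih (fun y hy => hl y (by simp [hy])) (j + 1) b

-- The first layer (index 0) produces exactly the length-1 tails.
lemma stepA_zero (r : Int) :
    stepA r [[[1, 0]]] 0
      = (tailsL r (0 + 1) (PySem.Int.floordiv r 2)).map (fun t => [1, 0] :: t) := by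
  rw [tailsL_one, List.map_map]
  unfold stepA
  rw [List.foldl_cons, List.foldl_nil, if_pos (show ((0 : Int) == 0) = true from rfl),
    PySem.List.foldl_append_singleton_eq_map, List.nil_append]
  simp [Function.comp_def]

-- ===== VERDICT (by name: the statement is the Claim_ definition above) =====
theorem genf0s_spec : Claim_equal_genf0s := by
  intro aWeight aTopPrime _hDom
  unfold Spec_genf0s
  simp only [genf0s, genf0s_alt]
  by_cases hk : aWeight - 1 ≤ 0
  · rw [PySem.List.pyRange_one_eq_nil hk, if_pos hk]
    rfl
  · have h0 : (0 : Int) < aWeight - 1 := by omega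
    rw [if_neg hk, PySem.List.pyRange_one_cons h0, List.foldl_cons]
    show (PySem.List.pyRange 1 (aWeight - 1) 1).foldl (stepA (prodPrevPrimesL aTopPrime))
        (stepA (prodPrevPrimesL aTopPrime) [[[1, 0]]] 0)
      = (tailsL (prodPrevPrimesL aTopPrime) (aWeight - 1).toNat
          (PySem.Int.floordiv (prodPrevPrimesL aTopPrime) 2)).map (fun t => [1, 0] :: t)
    rw [stepA_zero,
      stepA_fold (prodPrevPrimesL aTopPrime) (PySem.List.pyRange 1 (aWeight - 1) 1)
        (fun x hx => by
          have := (PySem.List.mem_pyRange_one).1 hx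
          omega) 0 (PySem.Int.floordiv (prodPrevPrimesL aTopPrime) 2)]
    rw [show 0 + 1 + (PySem.List.pyRange 1 (aWeight - 1) 1).length = (aWeight - 1).toNat from by
      rw [PySem.List.length_pyRange_one]; omega]
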